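-- pv_equiv track=rewrite | github.com/abdalgader-a/algorithms | interview_problems/reverse_to_make_equal.py | are_they_equal
-- ===== SOURCE A (Python) =====
-- import copy
--
-- def are_they_equal(target_array, array_b):
--     for i in range(len(target_array)):
--         if array_b[i] == target_array[i]:  # reduce the iterations the lists has identical entries at the beginning
--             continue
--         for j in range(i + 1, len(array_b)):
--             aux = copy.deepcopy(array_b)
--             aux[i:j + 1] = aux[i:j + 1][::-1]
--             if aux == target_array:
--                 return True
--
--     return False
-- ===== SOURCE B (Python) =====
-- def are_they_equal(target_array, array_b):
--     if len(target_array) != len(array_b):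
--         return False
--     diffs = [i for i in range(len(target_array)) if target_array[i] != array_b[i]]
--     if not diffs:
--         return False
--     L, R = diffs[0], diffs[-1]
--     return array_b[L:R + 1] == target_array[L:R + 1][::-1]
-- ===== Notes on version B (the rewrite author's own statement) =====
-- stated objective: faster
-- what changed: Instead of trying every reversal window (i,j) and rebuilding/comparing a deep copy each time, B computes the list of differing indices once, takes its first and last elements L,R, and checks that b[L:R+1] equals the reverse of target[L:R+1].
import Mathlib
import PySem

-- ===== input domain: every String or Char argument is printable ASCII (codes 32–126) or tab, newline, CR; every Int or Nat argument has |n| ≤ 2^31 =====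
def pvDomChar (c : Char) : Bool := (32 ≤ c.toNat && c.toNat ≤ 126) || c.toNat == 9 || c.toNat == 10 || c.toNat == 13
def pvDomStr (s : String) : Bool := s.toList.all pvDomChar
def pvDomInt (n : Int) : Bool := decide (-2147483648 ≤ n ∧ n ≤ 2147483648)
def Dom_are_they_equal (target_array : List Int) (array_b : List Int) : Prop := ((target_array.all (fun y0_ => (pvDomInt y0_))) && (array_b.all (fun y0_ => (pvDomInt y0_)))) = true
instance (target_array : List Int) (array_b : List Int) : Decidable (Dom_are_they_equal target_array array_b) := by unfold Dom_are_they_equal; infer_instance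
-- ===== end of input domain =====

-- B replaces A's try-every-reversal-window scan by a different algorithm: compute the list of
-- differing indices once, take its first/last elements L,R, and compare one reversed segment.


-- ===== PORT A =====
-- aux = deepcopy(array_b); aux[i:j+1] = aux[i:j+1][::-1]  — the resulting list is
-- aux[:i] ++ reverse(aux[i:j+1]) ++ aux[j+1:], written with PySem slices ([::-1] is .reverse,
-- PySem.List.slice?_none_none_neg_one).
def pvRevSeg (xs : List Int) (i j : Nat) : List Int :=
  PySem.List.slice xs none (some (i : Int)) ++
    (PySem.List.slice xs (some (i : Int)) (some ((j : Int) + 1))).reverse ++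
    PySem.List.slice xs (some ((j : Int) + 1)) none

-- for i in range(len(target_array)) with early 'return True' = List.any; the inner
-- for j in range(i+1, len(array_b)) likewise (range(a,b) over the Nats a..b-1 = List.range').
-- array_b[i] is total here via getD; Python raises IndexError when i ≥ len(array_b), which
-- Pre_are_they_equal excludes.
def are_they_equal (target_array : List Int) (array_b : List Int) : Bool :=
  (List.range target_array.length).any (fun i =>
    if array_b.getD i 0 == target_array.getD i 0 then false
    else
      (List.range' (i + 1) (array_b.length - (i + 1))).any (fun j =>
        pvRevSeg array_b i j == target_array))

-- ===== PORT B =====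
def are_they_equal_alt (target_array : List Int) (array_b : List Int) : Bool :=
  if target_array.length != array_b.length then false
  else
    let diffs := (List.range target_array.length).filter
      (fun i => !(target_array.getD i 0 == array_b.getD i 0))
    match diffs.head?, diffs.getLast? with
    | some L, some R =>
        PySem.List.slice array_b (some (L : Int)) (some ((R : Int) + 1)) ==
          (PySem.List.slice target_array (some (L : Int)) (some ((R : Int) + 1))).reverse
    | _, _ => false

-- ===== PRECONDITION & SPEC =====
-- Pre_ excludes exactly the inputs where A raises IndexError: array_b[i] with
-- len(target_array) > len(array_b) (A can never return True before reaching such an i).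
def Pre_are_they_equal (target_array : List Int) (array_b : List Int) : Prop :=
  target_array.length ≤ array_b.length
instance (target_array : List Int) (array_b : List Int) : Decidable (Pre_are_they_equal target_array array_b) := by unfold Pre_are_they_equal; infer_instance

def pvWitness_are_they_equal : List Int × List Int := ([1, 2, 3], [1, 3, 2])

def Spec_are_they_equal (target_array : List Int) (array_b : List Int) (out : Bool) : Prop := out = are_they_equal_alt target_array array_b
instance (target_array : List Int) (array_b : List Int) (out : Bool) : Decidable (Spec_are_they_equal target_array array_b out) := by unfold Spec_are_they_equal; infer_instance

-- ===== CLAIM (what is proved, stated in full; the proofs are below) =====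
def Claim_equal_are_they_equal : Prop := ∀ (target_array : List Int) (array_b : List Int), Dom_are_they_equal target_array array_b → Pre_are_they_equal target_array array_b → Spec_are_they_equal target_array array_b (are_they_equal target_array array_b)


-- ===== LEMMAS AND PROOFS =====

theorem A_iff (t b : List Int) (hpre : t.length ≤ b.length) :
    are_they_equal t b = true ↔
      ∃ i j : Nat, i < t.length ∧ i + 1 ≤ j ∧ j < b.length ∧
        b.getD i 0 ≠ t.getD i 0 ∧ pvRevSeg b i j = t := by
  unfold are_they_equal
  rw [List.any_eq_true]
  constructor
  · rintro ⟨i, hi, hbranch⟩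
    rw [List.mem_range] at hi
    by_cases hbt : b.getD i 0 == t.getD i 0
    · rw [if_pos hbt] at hbranch; exact absurd hbranch (by simp)
    · rw [if_neg hbt, List.any_eq_true] at hbranch
      obtain ⟨j, hj, hrev⟩ := hbranch
      rw [List.mem_range'_1] at hj
      refine ⟨i, j, hi, hj.1, by omega, by simpa using hbt, beq_iff_eq.mp hrev⟩
  · rintro ⟨i, j, hi, hij, hjb, hne, hrev⟩
    refine ⟨i, List.mem_range.mpr hi, ?_⟩
    rw [if_neg (by simpa using hne), List.any_eq_true]
    exact ⟨j, List.mem_range'_1.mpr ⟨hij, by omega⟩, beq_iff_eq.mpr hrev⟩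

theorem B_nil (t b : List Int) (hlen : t.length = b.length)
    (hd : (List.range t.length).filter (fun i => !(t.getD i 0 == b.getD i 0)) = []) :
    are_they_equal_alt t b = false := by
  unfold are_they_equal_alt
  rw [if_neg (by simp [hlen])]
  simp only [hd]
  rfl

theorem B_cons (t b : List Int) (hlen : t.length = b.length) (L : Nat) (tl : List Nat)
    (hd : (List.range t.length).filter (fun i => !(t.getD i 0 == b.getD i 0)) = L :: tl) :
    are_they_equal_alt t b =
      ((b.drop L).take ((L :: tl).getLast (by simp) + 1 - L) ==
        ((t.drop L).take ((L :: tl).getLast (by simp) + 1 - L)).reverse) := by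
  unfold are_they_equal_alt
  rw [if_neg (by simp [hlen])]
  simp only [hd, List.head?_cons, List.getLast?_eq_some_getLast (l := L :: tl) (by simp)]
  have hcast : ∀ (k : Nat), ((k : Int) + 1) = ((k + 1 : Nat) : Int) := by intro k; push_cast; ring
  rw [hcast, PySem.List.slice_natCast, PySem.List.slice_natCast]

theorem pvRevSeg_eq (xs : List Int) (i j : Nat) :
    pvRevSeg xs i j = xs.take i ++ ((xs.drop i).take (j + 1 - i)).reverse ++ xs.drop (j + 1) := by
  have h1 : ((j : Int) + 1) = ((j + 1 : Nat) : Int) := by push_cast; ring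
  rw [pvRevSeg, h1, PySem.List.slice_to_natCast, PySem.List.slice_natCast,
    PySem.List.slice_from_natCast]

theorem length_pvRevSeg (xs : List Int) (i j : Nat) (hij : i ≤ j) (hj : j < xs.length) :
    (pvRevSeg xs i j).length = xs.length := by
  rw [pvRevSeg_eq]
  simp
  omega

theorem take_eq_iff (t b : List Int) (i : Nat) (hi : i ≤ t.length) (hlen : t.length = b.length) :
    b.take i = t.take i ↔ ∀ k, k < i → b.getD k 0 = t.getD k 0 := by
  constructor
  · intro h k hk
    have h2 := congrArg (fun l => l[k]?) h
    simp only [List.getElem?_take] at h2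
    rw [List.getD_eq_getElem b 0 (by omega), List.getD_eq_getElem t 0 (by omega)]
    simp only [if_pos hk] at h2
    have hb := List.getElem?_eq_getElem (l := b) (i := k) (by omega)
    have ht := List.getElem?_eq_getElem (l := t) (i := k) (by omega)
    rw [hb, ht] at h2
    exact Option.some_injective _ h2
  · intro h
    apply List.ext_getElem (by simp; omega)
    intro m h1 h2
    simp only [List.getElem_take]
    have hm : m < i := by simp at h1; omega
    have := h m hm
    rwa [List.getD_eq_getElem b 0 (by omega), List.getD_eq_getElem t 0 (by omega)] at this

theorem drop_eq_iff (t b : List Int) (m : Nat) (hlen : t.length = b.length) :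
    b.drop m = t.drop m ↔ ∀ k, m ≤ k → k < t.length → b.getD k 0 = t.getD k 0 := by
  constructor
  · intro h k hk1 hk2
    have h2 := congrArg (fun l => l[k - m]?) h
    simp only [List.getElem?_drop] at h2
    have e1 : m + (k - m) = k := by omega
    rw [e1] at h2
    rw [List.getD_eq_getElem b 0 (by omega), List.getD_eq_getElem t 0 (by omega)]
    rw [List.getElem?_eq_getElem (l := b) (i := k) (by omega),
      List.getElem?_eq_getElem (l := t) (i := k) (by omega)] at h2
    exact Option.some_injective _ h2
  · intro h
    apply List.ext_getElem (by simp; omega)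
    intro x h1 h2
    simp only [List.getElem_drop]
    have hx : m + x < t.length := by simp at h2; omega
    have := h (m + x) (by omega) hx
    rwa [List.getD_eq_getElem b 0 (by omega), List.getD_eq_getElem t 0 (by omega)] at this

theorem decomp (t b : List Int) (i j : Nat) (hlen : t.length = b.length) (hij : i ≤ j)
    (hj : j < b.length) :
    pvRevSeg b i j = t ↔
      b.take i = t.take i ∧
        ((b.drop i).take (j + 1 - i)).reverse = (t.drop i).take (j + 1 - i) ∧
          b.drop (j + 1) = t.drop (j + 1) := by
  rw [pvRevSeg_eq]
  have ht : t.take i ++ ((t.drop i).take (j + 1 - i) ++ t.drop (j + 1)) = t := by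
    have : (t.drop i).drop (j + 1 - i) = t.drop (j + 1) := by
      rw [List.drop_drop]; congr 1; omega
    rw [← this, List.take_append_drop, List.take_append_drop]
  constructor
  · intro h
    rw [List.append_assoc] at h
    conv_rhs at h => rw [← ht]
    have l1 : (b.take i).length = (t.take i).length := by simp; omega
    obtain ⟨e1, h2⟩ := List.append_inj h l1
    have l2 : ((b.drop i).take (j + 1 - i)).reverse.length = ((t.drop i).take (j + 1 - i)).length := by
      simp; omega
    obtain ⟨e2, e3⟩ := List.append_inj h2 l2
    exact ⟨e1, e2, e3⟩
  · rintro ⟨e1, e2, e3⟩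
    rw [e1, e2, e3, List.append_assoc]
    exact ht

theorem endpoints (t b : List Int) (L j : Nat) (hLj : L ≤ j) (hj : j < t.length)
    (hlen : t.length = b.length)
    (hmid : ((b.drop L).take (j + 1 - L)).reverse = (t.drop L).take (j + 1 - L)) :
    t.getD L 0 = b.getD j 0 ∧ t.getD j 0 = b.getD L 0 := by
  set m := j + 1 - L with hm
  have hsb : ((b.drop L).take m).length = m := by simp; omega
  have hst : ((t.drop L).take m).length = m := by simp; omega
  have hm1 : 1 ≤ m := by omega
  constructor
  · -- index 0 : reverse[0] = seg_b[m-1] = b[j] ; rhs[0] = t[L]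
    have h0 := congrArg (fun l => l[0]?) hmid
    simp only at h0
    rw [List.getElem?_eq_getElem (by simp [hsb]; omega),
      List.getElem?_eq_getElem (by rw [hst]; omega)] at h0
    have hv := Option.some_injective _ h0
    rw [List.getElem_reverse] at hv
    simp only [hsb] at hv
    rw [List.getElem_take, List.getElem_drop] at hv
    rw [List.getElem_take, List.getElem_drop] at hv
    have e1 : L + (m - 1 - 0) = j := by omega
    have e2 : L + 0 = L := by omega
    simp only [e1, e2] at hv
    rw [List.getD_eq_getElem t 0 (by omega), List.getD_eq_getElem b 0 (by omega)]
    exact hv.symm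
  · have h0 := congrArg (fun l => l[m - 1]?) hmid
    simp only at h0
    rw [List.getElem?_eq_getElem (by simp [hsb]; omega),
      List.getElem?_eq_getElem (by rw [hst]; omega)] at h0
    have hv := Option.some_injective _ h0
    rw [List.getElem_reverse] at hv
    simp only [hsb] at hv
    rw [List.getElem_take, List.getElem_drop] at hv
    rw [List.getElem_take, List.getElem_drop] at hv
    have e1 : L + (m - 1 - (m - 1)) = L := by omega
    have e2 : L + (m - 1) = j := by omega
    simp only [e1, e2] at hv
    rw [List.getD_eq_getElem t 0 (by omega), List.getD_eq_getElem b 0 (by omega)]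
    exact hv.symm

theorem le_getLast_of_pairwise {l : List Nat} {R k : Nat} (h : List.Pairwise (· < ·) l)
    (hR : l.getLast? = some R) (hk : k ∈ l) : k ≤ R := by
  induction l generalizing k with
  | nil => simp at hk
  | cons a t ih =>
    cases t with
    | nil => simp at hR hk; omega
    | cons b t2 =>
      rw [List.getLast?_cons_cons] at hR
      rcases List.mem_cons.mp hk with rfl | hm
      · have hb : k < b := (List.pairwise_cons.mp h).1 b (by simp)
        have := ih (List.pairwise_cons.mp h).2 hR (k := b) (by simp)
        omega
      · exact ih (List.pairwise_cons.mp h).2 hR hm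

theorem main_equiv (t b : List Int) (hpre : t.length ≤ b.length) :
    are_they_equal t b = are_they_equal_alt t b := by
  by_cases hlen : t.length = b.length
  · -- equal lengths
    have hmem : ∀ k, k ∈ (List.range t.length).filter (fun i => !(t.getD i 0 == b.getD i 0)) ↔
        (k < t.length ∧ t.getD k 0 ≠ b.getD k 0) := by
      intro k; rw [List.mem_filter, List.mem_range]; simp
    have hpw : List.Pairwise (· < ·)
        ((List.range t.length).filter (fun i => !(t.getD i 0 == b.getD i 0))) :=
      List.Pairwise.filter _ List.pairwise_lt_range
    cases hd : (List.range t.length).filter (fun i => !(t.getD i 0 == b.getD i 0)) with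
    | nil =>
      rw [B_nil t b hlen hd]
      unfold are_they_equal
      rw [List.any_eq_false]
      intro i hi
      rw [List.mem_range] at hi
      have heq : t.getD i 0 = b.getD i 0 := by
        by_contra hne
        have : i ∈ (List.range t.length).filter (fun i => !(t.getD i 0 == b.getD i 0)) :=
          (hmem i).mpr ⟨hi, hne⟩
        rw [hd] at this; simp at this
      rw [if_pos (by simpa using heq.symm)]
      simp
    | cons L tl =>
      rw [B_cons t b hlen L tl hd]
      set R := (L :: tl).getLast (by simp) with hR
      have hLmem : L ∈ (List.range t.length).filter (fun i => !(t.getD i 0 == b.getD i 0)) := by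
        rw [hd]; simp
      have hRmem : R ∈ (List.range t.length).filter (fun i => !(t.getD i 0 == b.getD i 0)) := by
        rw [hd]; exact List.getLast_mem (by simp)
      have hLfact := (hmem L).mp hLmem
      have hRfact := (hmem R).mp hRmem
      have hLmin : ∀ k ∈ (List.range t.length).filter (fun i => !(t.getD i 0 == b.getD i 0)),
          L ≤ k := by
        intro k hk
        rw [hd] at hk
        rcases List.mem_cons.mp hk with rfl | hm
        · exact le_refl k
        · exact le_of_lt ((List.pairwise_cons.mp (hd ▸ hpw)).1 k hm)
      have hRmax : ∀ k ∈ (List.range t.length).filter (fun i => !(t.getD i 0 == b.getD i 0)),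
          k ≤ R := by
        intro k hk
        exact le_getLast_of_pairwise hpw
          (by rw [hd]; exact List.getLast?_eq_some_getLast (by simp)) hk
      have hLR : L ≤ R := hLmin R hRmem
      rw [Bool.eq_iff_iff, A_iff t b hpre, beq_iff_eq]
      constructor
      · rintro ⟨i, j, hi, hij, hjb, hne, hrev⟩
        rw [decomp t b i j hlen (by omega) hjb] at hrev
        obtain ⟨e1, e2, e3⟩ := hrev
        have himem : i ∈ (List.range t.length).filter (fun i => !(t.getD i 0 == b.getD i 0)) :=
          (hmem i).mpr ⟨hi, fun h => hne h.symm⟩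
        have hiL : i = L := by
          have h1 : L ≤ i := hLmin i himem
          rcases Nat.eq_or_lt_of_le h1 with h | h
          · omega
          · exfalso
            have := (take_eq_iff t b i (by omega) hlen).mp e1 L h
            exact hLfact.2 this.symm
        subst hiL
        have hjn : j < t.length := by omega
        obtain ⟨hep1, hep2⟩ := endpoints t b i j (by omega) hjn hlen e2
        have hjmem : j ∈ (List.range t.length).filter (fun i => !(t.getD i 0 == b.getD i 0)) := by
          refine (hmem j).mpr ⟨hjn, fun h => ?_⟩
          exact hLfact.2 (by rw [hep1, ← h, hep2])
        have hjR : j = R := by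
          have h1 : j ≤ R := hRmax j hjmem
          rcases Nat.eq_or_lt_of_le h1 with h | h
          · exact h
          · exfalso
            have := (drop_eq_iff t b (j + 1) hlen).mp e3 R (by omega) hRfact.1
            exact hRfact.2 this.symm
        subst hjR
        rw [← e2, List.reverse_reverse]
      · intro h
        have hLneR : L ≠ R := by
          intro hEq
          apply hLfact.2
          have hsub : R + 1 - L = 1 := by omega
          rw [hsub] at h
          have hbL : b.drop L = b.getD L 0 :: b.drop (L + 1) := by
            rw [List.getD_eq_getElem b 0 (by omega)]
            exact List.drop_eq_getElem_cons (by omega)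
          have htL : t.drop L = t.getD L 0 :: t.drop (L + 1) := by
            rw [List.getD_eq_getElem t 0 (by rw [← hEq] at hRfact; exact hLfact.1)]
            exact List.drop_eq_getElem_cons (by omega)
          rw [hbL, htL] at h
          simp at h
          exact h.symm
        refine ⟨L, R, hLfact.1, by omega, by omega, fun hc => hLfact.2 hc.symm, ?_⟩
        rw [decomp t b L R hlen (by omega) (by omega)]
        refine ⟨?_, ?_, ?_⟩
        · rw [take_eq_iff t b L (by omega) hlen]
          intro k hk
          by_contra hne
          have : k ∈ (List.range t.length).filter (fun i => !(t.getD i 0 == b.getD i 0)) :=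
            (hmem k).mpr ⟨by omega, fun hc => hne hc.symm⟩
          have := hLmin k this
          omega
        · rw [h, List.reverse_reverse]
        · rw [drop_eq_iff t b (R + 1) hlen]
          intro k hk1 hk2
          by_contra hne
          have : k ∈ (List.range t.length).filter (fun i => !(t.getD i 0 == b.getD i 0)) :=
            (hmem k).mpr ⟨hk2, fun hc => hne hc.symm⟩
          have := hRmax k this
          omega
  · -- lengths differ: both false
    have hB : are_they_equal_alt t b = false := by
      unfold are_they_equal_alt
      rw [if_pos (by simpa using hlen)]
    rw [hB]
    unfold are_they_equal
    rw [List.any_eq_false]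
    intro i hi
    rw [List.mem_range] at hi
    by_cases hbt : b.getD i 0 == t.getD i 0
    · rw [if_pos hbt]; simp
    · rw [if_neg hbt]
      simp only [Bool.not_eq_true]
      rw [List.any_eq_false]
      intro j hj
      rw [List.mem_range'_1] at hj
      have hj2 : j < b.length := by omega
      have hlenR : (pvRevSeg b i j).length = b.length := length_pvRevSeg b i j (by omega) hj2
      simp only [beq_iff_eq]
      intro hEq
      exact hlen ((congrArg List.length hEq).symm.trans hlenR)

-- ===== VERDICT (by name: the statement is the Claim_ definition above) =====
theorem are_they_equal_spec : Claim_equal_are_they_equal := by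
  intro t b _ hpre
  unfold Spec_are_they_equal
  exact main_equiv t b hpre
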